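-- pv_equiv track=rewrite | github.com/raeez/chiral-bar-cobar | compute/lib/cy_elliptic_genus_k3e_engine.py | dmvv_product_coefficients
-- ===== SOURCE A (Python) =====
-- import math
-- from typing import Any, Dict, List, Optional, Sequence, Tuple
--
-- def dmvv_product_coefficients(max_N: int, max_q: int) -> Dict[Tuple[int, int], int]:
--     """DMVV product formula coefficients at z=0.
--
--     At z=0, the DMVV formula reduces to:
--         sum_N p^N chi(Hilb^N(K3)) = prod_{n>=1} 1/(1-p*q^n)^{24}
--                                    * (other terms)
--
--     Actually, the rigorous statement at z=0:
--     sum_{N>=0} p^N Z(Sym^N(K3)) = prod_{n>=1,m>=1} 1/(1 - p^n q^m)^{c(nm)}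
--
--     where c(k) is the k-th Fourier coefficient of the K3 partition function.
--
--     Since chi(Sym^N(K3)) = chi(Hilb^N(K3)) (by Gottsche's formula for surfaces):
--     chi(Hilb^N(K3)) = p(N, 24) (partitions of N into colors 1..24, weighted)
--
--     Actually: chi(Hilb^N(K3)) can be computed from Gottsche's formula:
--     sum_{N>=0} chi(Hilb^N(S)) t^N = prod_{k>=1} 1/(1-t^k)^{chi(S)}
--
--     For S = K3: chi(K3) = 24, so:
--     sum_{N>=0} chi(Hilb^N(K3)) t^N = prod_{k>=1} 1/(1-t^k)^{24}
--
--     First values: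
--       N=0: 1
--       N=1: 24  (= chi(K3))
--       N=2: 324
--       N=3: 3200
--     """
--     # Compute coefficients of prod 1/(1-t^k)^{24} up to t^{max_N}
--     coeffs = [0] * (max_N + 1)
--     coeffs[0] = 1
--     for k in range(1, max_N + 1):
--         # Multiply by 1/(1-t^k)^{24}
--         new = list(coeffs)
--         for idx in range(max_N + 1):
--             if new[idx] == 0 and idx > 0:
--                 continue
--             m = 1
--             while idx + k * m <= max_N:
--                 binom_coeff = math.comb(m + 23, 23)
--                 new[idx + k * m] += coeffs[idx] * binom_coeff
--                 m += 1
--         coeffs = new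
--
--     result = {}
--     for n in range(max_N + 1):
--         result[(n, 0)] = coeffs[n]
--     return result
-- ===== SOURCE B (Python) =====
-- def dmvv_product_coefficients(max_N: int, max_q: int):
--     """Coefficients of prod_{k>=1} 1/(1-t^k)^24 up to t^max_N, as {(n,0): c_n}.
--
--     Instead of convolving with the binomial series of 1/(1-t^k)^24, apply the
--     factor 1/(1-t^k) twenty-four times as an in-place stride-k running sum.
--     """
--     c = [1] + [0] * max_N
--     for k in range(1, max_N + 1):
--         for _ in range(24):
--             for i in range(k, max_N + 1):
--                 c[i] += c[i - k]
--     return {(n, 0): c[n] for n in range(max_N + 1)}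
-- ===== Notes on version B (the rewrite author's own statement) =====
-- stated objective: simpler
-- what changed: Instead of convolving the coefficient array with the binomial series of 1/(1-t^k)^24 (nested while-loop with math.comb and a zero-skip), B applies the factor 1/(1-t^k) twenty-four times as a simple in-place stride-k running sum c[i] += c[i-k].
import Mathlib
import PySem

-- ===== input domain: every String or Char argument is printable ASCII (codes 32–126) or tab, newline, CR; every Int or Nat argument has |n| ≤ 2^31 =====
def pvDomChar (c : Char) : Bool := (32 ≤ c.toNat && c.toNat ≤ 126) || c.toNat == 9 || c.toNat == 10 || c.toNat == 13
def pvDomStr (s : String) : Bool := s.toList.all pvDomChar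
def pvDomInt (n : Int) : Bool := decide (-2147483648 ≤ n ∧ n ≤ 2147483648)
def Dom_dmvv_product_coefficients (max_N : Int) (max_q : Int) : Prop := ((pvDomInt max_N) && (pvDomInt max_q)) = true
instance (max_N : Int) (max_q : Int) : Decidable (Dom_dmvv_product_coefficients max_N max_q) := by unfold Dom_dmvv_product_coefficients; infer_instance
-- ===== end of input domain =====

-- B replaces A's binomial-series convolution for 1/(1-t^k)^24 by twenty-four in-place
-- stride-k running-sum passes (objective: simpler).  max_q is unused by both programs.

-- ===== PORT A =====
-- the `while idx + k*m <= max_N` loop; the `0 < k` conjunct only makes the recursion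
-- well-founded (every call site has 1 ≤ k), it never changes a reachable branch
def pvAwhile (n k idx : Nat) (cI : Int) (m : Nat) (new : List Int) : List Int :=
  if h : idx + k * m ≤ n ∧ 0 < k then
    pvAwhile n k idx cI (m + 1)
      (new.set (idx + k * m) (new.getD (idx + k * m) 0 + cI * ((m + 23).choose 23 : Int)))
  else new
termination_by n + 1 - (idx + k * m)
decreasing_by simp only [Nat.mul_succ]; omega

-- `new = list(coeffs)` then `for idx in range(max_N+1): …`
def pvAinner (n k : Nat) (coeffs : List Int) : List Int :=
  (List.range (n + 1)).foldl (fun new idx =>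
    if new.getD idx 0 = 0 ∧ 0 < idx then new
    else pvAwhile n k idx (coeffs.getD idx 0) 1 new) coeffs

def dmvv_product_coefficients (max_N : Int) (max_q : Int) : List (Int × Int × Int) :=
  let n := max_N.toNat   -- exact on Pre_ (0 ≤ max_N); A raises IndexError for max_N < 0
  let coeffs :=
    (List.range' 1 n).foldl (fun coeffs k => pvAinner n k coeffs)
      ((List.replicate (n + 1) (0 : Int)).set 0 1)
  -- the result dict has the pairwise-distinct keys (n,0) inserted for n = 0..max_N in
  -- order, so its item list is exactly this map (flattened ((n,0),v) ↦ (n,0,v))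
  (PySem.List.pyRange 0 (max_N + 1) 1).map (fun i => (i, 0, coeffs.getD i.toNat 0))

-- ===== PORT B =====
-- `for i in range(k, max_N+1): c[i] += c[i-k]`
def pvBpass (n k : Nat) (c : List Int) : List Int :=
  (List.range' k (n + 1 - k)).foldl
    (fun c i => c.set i (c.getD i 0 + c.getD (i - k) 0)) c

def dmvv_product_coefficients_alt (max_N : Int) (max_q : Int) : List (Int × Int × Int) :=
  let n := max_N.toNat   -- [1] + [0]*max_N = 1 :: replicate n 0 also for max_N < 0
  let c :=
    (List.range' 1 n).foldl (fun c k =>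
      (List.range 24).foldl (fun c _ => pvBpass n k c) c)
      (1 :: List.replicate n (0 : Int))
  -- dict comprehension over range(max_N+1): distinct keys in order, hence this map
  (PySem.List.pyRange 0 (max_N + 1) 1).map (fun i => (i, 0, c.getD i.toNat 0))

-- ===== PRECONDITION & SPEC =====
-- Pre_ excludes only max_N < 0, where A raises IndexError (coeffs[0] = 1 on the empty list)
def Pre_dmvv_product_coefficients (max_N : Int) (max_q : Int) : Prop := 0 ≤ max_N
instance (max_N : Int) (max_q : Int) : Decidable (Pre_dmvv_product_coefficients max_N max_q) := by
  unfold Pre_dmvv_product_coefficients; infer_instance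

def pvWitness_dmvv_product_coefficients : Int × Int := (3, 0)

def Spec_dmvv_product_coefficients (max_N : Int) (max_q : Int) (out : List (Int × Int × Int)) : Prop := out = dmvv_product_coefficients_alt max_N max_q
instance (max_N : Int) (max_q : Int) (out : List (Int × Int × Int)) : Decidable (Spec_dmvv_product_coefficients max_N max_q out) := by unfold Spec_dmvv_product_coefficients; infer_instance

-- ===== CLAIM (what is proved, stated in full; the proofs are below) =====
def Claim_equal_dmvv_product_coefficients : Prop := ∀ (max_N : Int) (max_q : Int), Dom_dmvv_product_coefficients max_N max_q → Pre_dmvv_product_coefficients max_N max_q → Spec_dmvv_product_coefficients max_N max_q (dmvv_product_coefficients max_N max_q)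

-- ===== LEMMAS AND PROOFS =====

def pvBstep (s k : Nat) (c : Nat → Int) (i : Nat) : Int :=
  ∑ m ∈ Finset.range (i / k + 1), ((m + s).choose s : Int) * c (i - k * m)

def pvQf (k : Nat) (c : Nat → Int) : Nat → Int
  | i => if 0 < k ∧ k ≤ i then c i + pvQf k c (i - k) else c i
termination_by i => i
decreasing_by omega

lemma pvQf_unfold (k : Nat) (c : Nat → Int) (i : Nat) :
    pvQf k c i = if 0 < k ∧ k ≤ i then c i + pvQf k c (i - k) else c i := by
  rw [pvQf]

lemma pvLeDiv {m i k : Nat} (hk : 0 < k) : m ≤ i / k ↔ k * m ≤ i := by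
  rw [Nat.le_div_iff_mul_le hk, Nat.mul_comm]

lemma pvSubDiv {i k : Nat} (hk : 0 < k) (hki : k ≤ i) : (i - k) / k = i / k - 1 := by
  obtain ⟨q, hq⟩ : ∃ q, i / k = q + 1 := ⟨i / k - 1, by
    have := (pvLeDiv hk).2 (show k * 1 ≤ i by omega); omega⟩
  have h1 := Nat.div_add_mod i k
  rw [hq] at h1 ⊢
  have h3 : i - k = k * q + i % k := by rw [Nat.mul_succ] at h1; omega
  rw [h3, Nat.mul_add_div hk, Nat.div_eq_of_lt (Nat.mod_lt _ hk)]
  omega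

lemma pvSum_shift {k i : Nat} (hk : 0 < k) (hki : k ≤ i) (f : Nat → Int) :
    ∑ m ∈ Finset.range (i / k + 1), f m
      = f 0 + ∑ m ∈ Finset.range ((i - k) / k + 1), f (m + 1) := by
  have h2 : 1 ≤ i / k := (pvLeDiv hk).2 (by omega)
  rw [pvSubDiv hk hki, show i / k + 1 = (i / k - 1 + 1) + 1 by omega,
    Finset.sum_range_succ']
  ring

lemma pvQf_congr {k : Nat} {c c' : Nat → Int} (i : Nat)
    (h : ∀ t ≤ i, c t = c' t) : pvQf k c i = pvQf k c' i := by
  induction i using Nat.strong_induction_on with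
  | _ i ih =>
    rw [pvQf_unfold]
    conv_rhs => rw [pvQf_unfold]
    split
    · next hc =>
      rw [h i le_rfl, ih (i - k) (by omega) (fun t ht => h t (by omega))]
    · exact h i le_rfl

lemma pvQf_eq_bstep_zero {k : Nat} (hk : 0 < k) (c : Nat → Int) (i : Nat) :
    pvQf k c i = pvBstep 0 k c i := by
  induction i using Nat.strong_induction_on with
  | _ i ih =>
    rw [pvQf_unfold]
    split
    · next hc =>
      rw [ih (i - k) (by omega)]
      unfold pvBstep
      rw [pvSum_shift hk hc.2 (fun m => ((m + 0).choose 0 : Int) * c (i - k * m))]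
      simp only [Nat.choose_zero_right, Nat.cast_one, one_mul, Nat.mul_zero, Nat.sub_zero]
      congr 1
      apply Finset.sum_congr rfl
      intro m hm
      congr 1
      simp only [Nat.mul_succ]
      omega
    · next hc =>
      have hik : i < k := by omega
      unfold pvBstep
      rw [Nat.div_eq_of_lt hik]
      simp

lemma pvBstep_succ {k : Nat} (hk : 0 < k) (s : Nat) (c : Nat → Int) (i : Nat) :
    pvQf k (pvBstep s k c) i = pvBstep (s + 1) k c i := by
  induction i using Nat.strong_induction_on with
  | _ i ih =>
    rw [pvQf_unfold]
    split
    · next hc =>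
      rw [ih (i - k) (by omega)]
      have step1 : pvBstep (s + 1) k c i = pvBstep s k c i
          + ∑ m ∈ Finset.range (i / k + 1), ((m + s).choose (s + 1) : Int) * c (i - k * m) := by
        unfold pvBstep
        rw [← Finset.sum_add_distrib]
        apply Finset.sum_congr rfl
        intro m hm
        rw [show m + (s + 1) = (m + s) + 1 by omega, Nat.choose_succ_succ]
        push_cast; ring
      have step2 : (∑ m ∈ Finset.range (i / k + 1), ((m + s).choose (s + 1) : Int) * c (i - k * m))
          = pvBstep (s + 1) k c (i - k) := by
        rw [pvSum_shift hk hc.2 (fun m => ((m + s).choose (s + 1) : Int) * c (i - k * m))]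
        have hz : ((0 + s).choose (s + 1) : Int) = 0 := by
          norm_num [Nat.choose_eq_zero_of_lt]
        rw [hz, zero_mul, zero_add]
        unfold pvBstep
        apply Finset.sum_congr rfl
        intro m hm
        rw [show m + 1 + s = m + (s + 1) by omega]
        congr 2
        simp only [Nat.mul_succ]
        omega
      rw [step1, step2]
    · next hc =>
      have hik : i < k := by omega
      unfold pvBstep
      rw [Nat.div_eq_of_lt hik]
      simp

lemma pvQf_iterate_eq_bstep {k : Nat} (hk : 0 < k) (s : Nat) (c : Nat → Int) (i : Nat) :
    (pvQf k)^[s + 1] c i = pvBstep s k c i := by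
  induction s generalizing i with
  | zero => rw [Function.iterate_one]; exact pvQf_eq_bstep_zero hk c i
  | succ s ih =>
    rw [Function.iterate_succ_apply']
    rw [pvQf_congr i (fun t _ => ih t)]
    exact pvBstep_succ hk s c i

lemma pvBstep_congr {s k : Nat} {c c' : Nat → Int} {i : Nat}
    (h : ∀ t ≤ i, c t = c' t) : pvBstep s k c i = pvBstep s k c' i := by
  unfold pvBstep
  apply Finset.sum_congr rfl
  intro m hm
  rw [h (i - k * m) (by omega)]

lemma pvBstep_nonneg {s k : Nat} {c : Nat → Int} (hc : ∀ t, 0 ≤ c t) (i : Nat) :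
    0 ≤ pvBstep s k c i := by
  unfold pvBstep
  apply Finset.sum_nonneg
  intro m hm
  exact mul_nonneg (Int.natCast_nonneg _) (hc _)


def pvPSum (c : Nat → Int) (k j i : Nat) : Int :=
  ∑ m ∈ Finset.range (i / k + 1),
    if m = 0 ∨ i < j + k * m then ((m + 23).choose 23 : Int) * c (i - k * m) else 0

lemma pvGetD_set {l : List Int} {p : Nat} {v : Int} (hp : p < l.length) (i : Nat) :
    (l.set p v).getD i 0 = if i = p then v else l.getD i 0 := by
  rcases eq_or_ne i p with h | h
  · subst h; simp [List.getD_eq_getElem?_getD, List.getElem?_set, hp]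
  · simp [List.getD_eq_getElem?_getD, List.getElem?_set, h, Ne.symm h]

lemma pvAwhile_length (n k idx : Nat) (cI : Int) (m : Nat) (new : List Int) :
    (pvAwhile n k idx cI m new).length = new.length := by
  fun_induction pvAwhile n k idx cI m new with
  | case1 m new h ih => rw [ih]; exact List.length_set ..
  | case2 m new h => rfl

lemma pvAwhile_getD {n k idx : Nat} {cI : Int} (hk : 0 < k) (m : Nat) (new : List Int) :
    new.length = n + 1 → ∀ i ≤ n,
      (pvAwhile n k idx cI m new).getD i 0 =
        new.getD i 0 + (if idx + k * m ≤ i ∧ (i - idx) % k = 0 then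
          cI * (((i - idx) / k + 23).choose 23 : Int) else 0) := by
  fun_induction pvAwhile n k idx cI m new with
  | case1 m new h ih =>
    intro hlen i hi
    have hplt : idx + k * m < new.length := by omega
    have hlen' : (new.set (idx + k * m)
        (new.getD (idx + k * m) 0 + cI * ((m + 23).choose 23 : Int))).length = n + 1 := by
      rw [List.length_set]; exact hlen
    rw [ih hlen' i hi, pvGetD_set hplt i]
    rcases eq_or_ne i (idx + k * m) with he | he
    · subst he
      have h1 : (idx + k * m - idx) % k = 0 := by
        simp [Nat.mul_mod_right]
      have h2 : (idx + k * m - idx) / k = m := by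
        simp [Nat.mul_div_cancel_left _ hk]
      have hc1 : ¬ (idx + k * (m + 1) ≤ idx + k * m ∧ (idx + k * m - idx) % k = 0) := by
        simp only [Nat.mul_succ]; omega
      rw [if_pos rfl, if_neg hc1, if_pos ⟨le_rfl, h1⟩, h2]
      ring
    · rw [if_neg he]
      congr 1
      have hiff : (idx + k * (m + 1) ≤ i ∧ (i - idx) % k = 0)
          ↔ (idx + k * m ≤ i ∧ (i - idx) % k = 0) := by
        constructor
        · rintro ⟨ha, hb⟩
          exact ⟨by simp only [Nat.mul_succ] at ha; omega, hb⟩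
        · rintro ⟨ha, hb⟩
          refine ⟨?_, hb⟩
          have hq := Nat.div_add_mod (i - idx) k
          rw [hb] at hq
          set q := (i - idx) / k with hqdef
          have hd : i - idx = k * q := by omega
          have hmq : m ≤ q := Nat.le_of_mul_le_mul_left (by omega) hk
          have hne : m ≠ q := by
            intro hmq2
            apply he
            rw [← hmq2] at hd
            omega
          have : m + 1 ≤ q := by omega
          calc idx + k * (m + 1) ≤ idx + k * q := by
                have := Nat.mul_le_mul_left k this
                omega
            _ = i := by omega
      rw [if_congr hiff rfl rfl]
  | case2 m new h =>
    intro hlen i hi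
    have : ¬ (idx + k * m ≤ i ∧ (i - idx) % k = 0) := by
      rintro ⟨ha, _⟩; exact h ⟨by omega, hk⟩
    rw [if_neg this]
    ring

lemma pvPSum_zero {c : Nat → Int} {k : Nat} (hk : 0 < k) (i : Nat) :
    pvPSum c k 0 i = c i := by
  unfold pvPSum
  rw [Finset.sum_eq_single 0]
  · simp
  · intro m hm hm0
    rw [if_neg]
    rintro (h | h)
    · exact hm0 h
    · have : k * m ≤ i := (pvLeDiv hk).1 (by simp at hm; omega)
      omega
  · intro h
    simp at h

lemma pvPSum_succ {c : Nat → Int} {k : Nat} (hk : 0 < k) (j i : Nat) :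
    pvPSum c k (j + 1) i = pvPSum c k j i +
      (if j + k ≤ i ∧ (i - j) % k = 0 then c j * (((i - j) / k + 23).choose 23 : Int) else 0) := by
  unfold pvPSum
  have hterm : ∀ m ∈ Finset.range (i / k + 1),
      (if m = 0 ∨ i < (j + 1) + k * m then ((m + 23).choose 23 : Int) * c (i - k * m) else 0)
        = (if m = 0 ∨ i < j + k * m then ((m + 23).choose 23 : Int) * c (i - k * m) else 0)
          + (if ¬ m = 0 ∧ i = j + k * m then ((m + 23).choose 23 : Int) * c (i - k * m) else 0) := by
    intro m hm
    by_cases h0 : m = 0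
    · simp [h0]
    · rcases Nat.lt_trichotomy i (j + k * m) with hlt | heq | hgt
      · rw [if_pos (Or.inr (by omega)), if_pos (Or.inr hlt), if_neg (by omega)]
        ring
      · rw [if_pos (Or.inr (by omega)), if_neg (by omega), if_pos (by omega)]
        ring
      · rw [if_neg (by omega), if_neg (by omega), if_neg (by omega)]
        ring
  rw [Finset.sum_congr rfl hterm, Finset.sum_add_distrib]
  congr 1
  by_cases hc : j + k ≤ i ∧ (i - j) % k = 0
  · obtain ⟨hji, hmod⟩ := hc
    have hq := Nat.div_add_mod (i - j) k
    rw [hmod, Nat.add_zero] at hq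
    set q := (i - j) / k with hqdef
    have hd : i - j = k * q := hq.symm
    have hq1 : 1 ≤ q := by
      rcases Nat.eq_zero_or_pos q with h0 | h1
      · rw [h0, Nat.mul_zero] at hd; omega
      · exact h1
    have hiq : i = j + k * q := by omega
    have hmem : q ∈ Finset.range (i / k + 1) := by
      simp only [Finset.mem_range]
      have h2 : k * q ≤ i := by omega
      have := (pvLeDiv hk).2 h2
      omega
    rw [Finset.sum_eq_single_of_mem q hmem]
    · rw [if_pos ⟨by omega, hiq⟩, if_pos ⟨hji, hmod⟩]
      rw [show i - k * q = j by omega]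
      ring
    · intro m hm hmq
      rw [if_neg]
      rintro ⟨hm0, hme⟩
      apply hmq
      have : k * m = k * q := by omega
      exact Nat.eq_of_mul_eq_mul_left hk this
  · rw [if_neg hc, Finset.sum_eq_zero]
    intro m hm
    rw [if_neg]
    rintro ⟨hm0, hme⟩
    apply hc
    constructor
    · have : 1 ≤ m := by omega
      have := Nat.mul_le_mul_left k this
      omega
    · have : i - j = k * m := by omega
      rw [this]
      simp [Nat.mul_mod_right]

lemma pvPSum_full {c : Nat → Int} {k n : Nat} (hk : 0 < k) (i : Nat) (hi : i ≤ n) :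
    pvPSum c k (n + 1) i = pvBstep 23 k c i := by
  unfold pvPSum pvBstep
  apply Finset.sum_congr rfl
  intro m hm
  rw [if_pos]
  by_cases h0 : m = 0
  · exact Or.inl h0
  · right
    have : 1 ≤ m := by omega
    have := Nat.mul_le_mul_left k this
    omega

lemma pvPSum_self_zero {c : Nat → Int} {k j : Nat} (hk : 0 < k)
    (hc : ∀ t, 0 ≤ c t) (h : pvPSum c k j j = 0) : c j = 0 := by
  unfold pvPSum at h
  have hnn : ∀ m ∈ Finset.range (j / k + 1),
      0 ≤ (if m = 0 ∨ j < j + k * m then ((m + 23).choose 23 : Int) * c (j - k * m) else 0) := by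
    intro m hm
    split
    · exact mul_nonneg (Int.natCast_nonneg _) (hc _)
    · exact le_rfl
  rw [Finset.sum_eq_zero_iff_of_nonneg hnn] at h
  have h0 := h 0 (by simp)
  simpa using h0

lemma pvAinnerAux {n k : Nat} (hk : 0 < k) (coeffs : List Int)
    (hlen : coeffs.length = n + 1) (hc : ∀ t, 0 ≤ coeffs.getD t 0) :
    ∀ j, j ≤ n + 1 →
      (((List.range j).foldl (fun new idx =>
          if new.getD idx 0 = 0 ∧ 0 < idx then new
          else pvAwhile n k idx (coeffs.getD idx 0) 1 new) coeffs).length = n + 1 ∧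
        ∀ i ≤ n, ((List.range j).foldl (fun new idx =>
          if new.getD idx 0 = 0 ∧ 0 < idx then new
          else pvAwhile n k idx (coeffs.getD idx 0) 1 new) coeffs).getD i 0
            = pvPSum (fun t => coeffs.getD t 0) k j i) := by
  intro j
  induction j with
  | zero =>
    intro _
    refine ⟨hlen, fun i hi => ?_⟩
    simp only [List.range_zero, List.foldl_nil]
    rw [pvPSum_zero hk]
  | succ j ih =>
    intro hj
    obtain ⟨ihlen, ihval⟩ := ih (by omega)
    rw [List.range_succ, List.foldl_append, List.foldl_cons, List.foldl_nil]
    set prev := (List.range j).foldl (fun new idx =>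
      if new.getD idx 0 = 0 ∧ 0 < idx then new
      else pvAwhile n k idx (coeffs.getD idx 0) 1 new) coeffs with hprev
    by_cases hskip : prev.getD j 0 = 0 ∧ 0 < j
    · rw [if_pos hskip]
      refine ⟨ihlen, fun i hi => ?_⟩
      have hcj : coeffs.getD j 0 = 0 := by
        apply pvPSum_self_zero hk hc
        rw [← ihval j (by omega)]
        exact hskip.1
      rw [ihval i hi, pvPSum_succ hk]
      rw [hcj]
      simp only [zero_mul, ite_self, add_zero]
    · rw [if_neg hskip]
      refine ⟨by rw [pvAwhile_length]; exact ihlen, fun i hi => ?_⟩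
      rw [pvAwhile_getD hk 1 prev ihlen i hi, ihval i hi, pvPSum_succ hk]
      congr 1
      rw [Nat.mul_one]

lemma pvAinner_spec {n k : Nat} (hk : 0 < k) (coeffs : List Int)
    (hlen : coeffs.length = n + 1) (hc : ∀ t, 0 ≤ coeffs.getD t 0) :
    (pvAinner n k coeffs).length = n + 1 ∧
      ∀ i ≤ n, (pvAinner n k coeffs).getD i 0 = pvBstep 23 k (fun t => coeffs.getD t 0) i := by
  unfold pvAinner
  obtain ⟨h1, h2⟩ := pvAinnerAux hk coeffs hlen hc (n + 1) le_rfl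
  exact ⟨h1, fun i hi => by rw [h2 i hi, pvPSum_full hk i hi]⟩

lemma pvBpassAux {n k : Nat} (hk : 0 < k) (c0 : Nat → Int) :
    ∀ (cnt j : Nat) (c : List Int), k ≤ j → j + cnt = n + 1 → c.length = n + 1 →
      (∀ i ≤ n, c.getD i 0 = if i < j then pvQf k c0 i else c0 i) →
      (((List.range' j cnt).foldl (fun c i => c.set i (c.getD i 0 + c.getD (i - k) 0)) c).length = n + 1 ∧
        ∀ i ≤ n, ((List.range' j cnt).foldl (fun c i => c.set i (c.getD i 0 + c.getD (i - k) 0)) c).getD i 0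
          = pvQf k c0 i) := by
  intro cnt
  induction cnt with
  | zero =>
    intro j c hkj hjc hclen hcval
    refine ⟨hclen, fun i hi => ?_⟩
    simp only [List.range'_zero, List.foldl_nil]
    rw [hcval i hi, if_pos (by omega)]
  | succ cnt ih =>
    intro j c hkj hjc hclen hcval
    rw [List.range'_succ, List.foldl_cons]
    apply ih (j + 1) _ (by omega) (by omega)
    · rw [List.length_set]; exact hclen
    · intro i hi
      have hjlt : j < c.length := by omega
      rw [pvGetD_set hjlt i]
      rcases eq_or_ne i j with he | he
      · subst he
        rw [if_pos (by omega)]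
        rw [hcval i (by omega), if_neg (by omega)]
        rw [hcval (i - k) (by omega), if_pos (by omega)]
        conv_rhs => rw [pvQf_unfold]
        rw [if_pos (show 0 < k ∧ k ≤ i from ⟨hk, hkj⟩)]
        rw [if_pos (show i < i + 1 by omega)]
      · rw [if_neg he]
        rw [hcval i hi]
        have : i < j + 1 ↔ i < j := by omega
        rw [if_congr this rfl rfl]

lemma pvBpass_spec {n k : Nat} (hk : 0 < k) (hkn : k ≤ n + 1) (c : List Int)
    (hlen : c.length = n + 1) :
    (pvBpass n k c).length = n + 1 ∧
      ∀ i ≤ n, (pvBpass n k c).getD i 0 = pvQf k (fun t => c.getD t 0) i := by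
  unfold pvBpass
  apply pvBpassAux hk (fun t => c.getD t 0) (n + 1 - k) k c le_rfl (by omega) hlen
  intro i hi
  rcases Nat.lt_or_ge i k with h | h
  · rw [if_pos h, pvQf_unfold, if_neg (by omega)]
  · rw [if_neg (by omega)]

lemma pvB24_spec {n k : Nat} (hk : 0 < k) (hkn : k ≤ n + 1) (c : List Int)
    (hlen : c.length = n + 1) :
    ((List.range 24).foldl (fun c _ => pvBpass n k c) c).length = n + 1 ∧
      ∀ i ≤ n, ((List.range 24).foldl (fun c _ => pvBpass n k c) c).getD i 0 =
        pvBstep 23 k (fun t => c.getD t 0) i := by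
  have gen : ∀ s : Nat, ((List.range s).foldl (fun c _ => pvBpass n k c) c).length = n + 1 ∧
      ∀ i ≤ n, ((List.range s).foldl (fun c _ => pvBpass n k c) c).getD i 0 =
        ((pvQf k)^[s] (fun t => c.getD t 0)) i := by
    intro s
    induction s with
    | zero => exact ⟨hlen, fun i hi => by simp⟩
    | succ s ih =>
      obtain ⟨ihlen, ihval⟩ := ih
      rw [List.range_succ, List.foldl_append, List.foldl_cons, List.foldl_nil]
      obtain ⟨plen, pval⟩ := pvBpass_spec hk hkn _ ihlen
      refine ⟨plen, fun i hi => ?_⟩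
      rw [pval i hi, Function.iterate_succ_apply']
      exact pvQf_congr i (fun t ht => ihval t (by omega))
  obtain ⟨glen, gval⟩ := gen 24
  refine ⟨glen, fun i hi => ?_⟩
  rw [gval i hi, show (24 : Nat) = 23 + 1 from rfl, pvQf_iterate_eq_bstep hk]

def pvSpecF : Nat → Nat → Int
  | 0, i => if i = 0 then 1 else 0
  | (K + 1), i => pvBstep 23 (K + 1) (pvSpecF K) i

lemma pvSpecF_nonneg : ∀ K i, 0 ≤ pvSpecF K i := by
  intro K
  induction K with
  | zero => intro i; unfold pvSpecF; split <;> norm_num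
  | succ K ih => intro i; exact pvBstep_nonneg ih i

lemma pvGetD_default {l : List Int} {t : Nat} (h : l.length ≤ t) : l.getD t 0 = 0 := by
  rw [List.getD_eq_getElem?_getD, List.getElem?_eq_none (by omega)]
  rfl

lemma pvInitA (n : Nat) : ∀ i ≤ n,
    ((List.replicate (n + 1) (0 : Int)).set 0 1).getD i 0 = pvSpecF 0 i := by
  intro i hi
  rw [pvGetD_set (by simp) i]
  unfold pvSpecF
  rcases eq_or_ne i 0 with h | h
  · simp [h]
  · rw [if_neg h, if_neg h, List.getD_eq_getElem?_getD, List.getElem?_replicate,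
      if_pos (by omega)]
    rfl

lemma pvInitB (n : Nat) : ∀ i ≤ n,
    ((1 : Int) :: List.replicate n (0 : Int)).getD i 0 = pvSpecF 0 i := by
  intro i hi
  unfold pvSpecF
  rcases eq_or_ne i 0 with h | h
  · simp [h]
  · obtain ⟨t, rfl⟩ : ∃ t, i = t + 1 := ⟨i - 1, by omega⟩
    rw [if_neg h]
    simp only [List.getD_cons_succ]
    rw [List.getD_eq_getElem?_getD, List.getElem?_replicate, if_pos (by omega)]
    rfl

lemma pvOuterA (n : Nat) : ∀ K, K ≤ n →
    (((List.range' 1 K).foldl (fun coeffs k => pvAinner n k coeffs)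
        ((List.replicate (n + 1) (0 : Int)).set 0 1)).length = n + 1 ∧
      ∀ i ≤ n, ((List.range' 1 K).foldl (fun coeffs k => pvAinner n k coeffs)
        ((List.replicate (n + 1) (0 : Int)).set 0 1)).getD i 0 = pvSpecF K i) := by
  intro K
  induction K with
  | zero =>
    intro _
    refine ⟨by simp, fun i hi => ?_⟩
    simp only [List.range'_zero, List.foldl_nil]
    exact pvInitA n i hi
  | succ K ih =>
    intro hK
    obtain ⟨ihlen, ihval⟩ := ih (by omega)
    rw [List.range'_concat, List.foldl_append, List.foldl_cons, List.foldl_nil]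
    simp only [Nat.one_mul]
    have hnn : ∀ t, 0 ≤ ((List.range' 1 K).foldl (fun coeffs k => pvAinner n k coeffs)
        ((List.replicate (n + 1) (0 : Int)).set 0 1)).getD t 0 := by
      intro t
      rcases Nat.lt_or_ge t (n + 1) with h | h
      · rw [ihval t (by omega)]; exact pvSpecF_nonneg K t
      · rw [pvGetD_default (by omega)]
    obtain ⟨alen, aval⟩ := pvAinner_spec (k := 1 + K) (by omega) _ ihlen hnn
    refine ⟨alen, fun i hi => ?_⟩
    rw [aval i hi]
    show pvBstep 23 (1 + K) _ i = pvSpecF (K + 1) i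
    unfold pvSpecF
    rw [show 1 + K = K + 1 by omega]
    exact pvBstep_congr (fun t ht => ihval t (by omega))

lemma pvOuterB (n : Nat) : ∀ K, K ≤ n →
    (((List.range' 1 K).foldl (fun c k => (List.range 24).foldl (fun c _ => pvBpass n k c) c)
        ((1 : Int) :: List.replicate n (0 : Int))).length = n + 1 ∧
      ∀ i ≤ n, ((List.range' 1 K).foldl (fun c k => (List.range 24).foldl (fun c _ => pvBpass n k c) c)
        ((1 : Int) :: List.replicate n (0 : Int))).getD i 0 = pvSpecF K i) := by
  intro K
  induction K with
  | zero =>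
    intro _
    refine ⟨by simp, fun i hi => ?_⟩
    simp only [List.range'_zero, List.foldl_nil]
    exact pvInitB n i hi
  | succ K ih =>
    intro hK
    obtain ⟨ihlen, ihval⟩ := ih (by omega)
    rw [List.range'_concat, List.foldl_append, List.foldl_cons, List.foldl_nil]
    simp only [Nat.one_mul]
    obtain ⟨blen, bval⟩ := pvB24_spec (k := 1 + K) (by omega) (by omega) _ ihlen
    refine ⟨blen, fun i hi => ?_⟩
    rw [bval i hi]
    show pvBstep 23 (1 + K) _ i = pvSpecF (K + 1) i
    unfold pvSpecF
    rw [show 1 + K = K + 1 by omega]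
    exact pvBstep_congr (fun t ht => ihval t (by omega))

-- ===== VERDICT (by name: the statement is the Claim_ definition above) =====
theorem dmvv_product_coefficients_spec : Claim_equal_dmvv_product_coefficients := by
  intro max_N max_q hdom hpre
  unfold Spec_dmvv_product_coefficients dmvv_product_coefficients dmvv_product_coefficients_alt
  apply List.map_congr_left
  intro i hi
  have h0N : (0 : Int) ≤ max_N := hpre
  have hmem := (PySem.List.mem_pyRange_one).1 hi
  have hin : i.toNat ≤ max_N.toNat := by omega
  have hA := (pvOuterA max_N.toNat max_N.toNat le_rfl).2 i.toNat hin
  have hB := (pvOuterB max_N.toNat max_N.toNat le_rfl).2 i.toNat hin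
  rw [hA, hB]
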